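-- pv_equiv track=rewrite | github.com/lvpengcheng/DataMerge | excel_parser.py | _is_concatenation_of
-- ===== SOURCE A (Python) =====
-- from typing import List, Dict, Any, Optional, Callable
--
-- def _is_concatenation_of(target: str, parts: List[str]) -> bool:
--     """检查 target 是否可以由 parts 中的 2+ 个值拼接组成
--
--     例如：
--     - _is_concatenation_of("公司缴费", ["养老保险", "公司", "缴费"]) → True（"公司"+"缴费"）
--     - _is_concatenation_of("养老基数", ["养老保险", "基数"]) → True（"养老"⊂"养老保险", "基数"）
--     - _is_concatenation_of("序号", ["序号"]) → False（只有1个，不算拼接）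
--     """
--     if len(parts) < 2:
--         return False
--
--     # 方法1：target 恰好是 parts 中连续子集的拼接
--     for i in range(len(parts)):
--         for j in range(i + 1, len(parts) + 1):
--             concat = "".join(parts[i:j])
--             if concat == target:
--                 return True
--
--     # 方法2：target 可以由 parts 中任意 2 个值的子串拼接
--     # 例如："养老基数" = "养老"(from "养老保险") + "基数"
--     for i in range(len(parts)):
--         for j in range(len(parts)):
--             if i == j:
--                 continue
--             pi, pj = parts[i], parts[j]
--             # 检查 target 是否以 pi 的前缀开始，以 pj 结尾
--             for prefix_len in range(1, len(pi) + 1):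
--                 prefix = pi[:prefix_len]
--                 if target.startswith(prefix) and target[len(prefix):] == pj:
--                     return True
--                 if target.startswith(prefix) and target.endswith(pj):
--                     middle = target[len(prefix):len(target) - len(pj)]
--                     if not middle:  # 恰好是 prefix + pj
--                         return True
--
--     return False
-- ===== SOURCE B (Python) =====
-- from typing import List
--
-- def _is_concatenation_of(target: str, parts: List[str]) -> bool:
--     n = len(parts)
--     if n < 2:
--         return False
--     # contiguous run of parts: grow the join incrementally, stop once it is too long
--     for i in range(n):
--         s = ""
--         for p in parts[i:]:
--             s += p
--             if len(target) < len(s):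
--                 break
--             if s == target:
--                 return True
--     # a nonempty prefix of parts[i] plus parts[j] covering target (overlap allowed)
--     if target:
--         for j in range(n):
--             pj = parts[j]
--             if not target.endswith(pj):
--                 continue
--             req = target[:max(1, len(target) - len(pj))]
--             for i in range(n):
--                 if i != j and parts[i].startswith(req):
--                     return True
--     return False
-- ===== Notes on version B (the rewrite author's own statement) =====
-- stated objective: faster
-- what changed: Method 1 builds each contiguous join incrementally with a length early-exit instead of re-joining every slice; method 2's triple loop over all prefix lengths of every pair is replaced by one suffix match per part plus a single computed-prefix startswith check (overlap case folded into max(1, len(target)-len(pj))).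
import Mathlib
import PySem

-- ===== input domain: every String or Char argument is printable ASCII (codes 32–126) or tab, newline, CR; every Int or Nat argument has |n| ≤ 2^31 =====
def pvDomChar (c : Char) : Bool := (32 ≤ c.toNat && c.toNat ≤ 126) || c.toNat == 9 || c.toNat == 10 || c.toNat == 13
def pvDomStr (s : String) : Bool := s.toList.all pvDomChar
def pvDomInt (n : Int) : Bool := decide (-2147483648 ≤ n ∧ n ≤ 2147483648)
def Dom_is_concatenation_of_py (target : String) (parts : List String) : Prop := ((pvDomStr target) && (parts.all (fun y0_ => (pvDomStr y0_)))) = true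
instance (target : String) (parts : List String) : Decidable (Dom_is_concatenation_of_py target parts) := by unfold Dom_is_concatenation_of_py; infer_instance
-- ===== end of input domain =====

-- B is a faster re-implementation: incremental joins with a length early-exit replace the
-- re-joined slices, and one suffix-match + computed-prefix check replaces A's triple loop.

-- ===== PORT A =====
-- literal transliteration of _is_concatenation_of; loops with `return True` become `any`
def is_concatenation_of_py (target : String) (parts : List String) : Bool :=
  let n : Int := (parts.length : Int)
  if n < 2 then false
  else
    -- 方法1: target is the join of a contiguous slice of parts
    let m1 := (PySem.List.pyRange 0 n).any (fun i =>
      (PySem.List.pyRange (i+1) (n+1)).any (fun j =>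
        PySem.Str.join "" (PySem.List.slice parts (some i) (some j)) == target))
    if m1 then true
    else
      -- 方法2: a prefix of parts[i] followed by parts[j]
      (PySem.List.pyRange 0 n).any (fun i =>
        (PySem.List.pyRange 0 n).any (fun j =>
          if i == j then false
          else
            let pi := PySem.List.pyGetD parts i ""
            let pj := PySem.List.pyGetD parts j ""
            (PySem.List.pyRange 1 (PySem.Str.len pi + 1)).any (fun L =>
              let pre := PySem.Str.slice pi none (some L)
              (PySem.Str.startswith target pre &&
                 (PySem.Str.slice target (some (PySem.Str.len pre)) none == pj)) ||
              (PySem.Str.startswith target pre && PySem.Str.endswith target pj &&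
                 (PySem.Str.slice target (some (PySem.Str.len pre))
                    (some (PySem.Str.len target - PySem.Str.len pj)) == "")))))

-- ===== PORT B =====
-- inner loop of B's method 1: `for p in parts[i:]: s += p; break/return` over char lists
def pvAltRun (t : List Char) : List String → List Char → Bool
  | [], _ => false
  | p :: rest, s =>
    let s' := s ++ p.toList
    if t.length < s'.length then false
    else if s' = t then true
    else pvAltRun t rest s'

def is_concatenation_of_py_alt (target : String) (parts : List String) : Bool :=
  let n := parts.length
  if n < 2 then false
  else
    let t := target.toList
    let m1 := (List.range n).any (fun i => pvAltRun t (parts.drop i) [])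
    if m1 then true
    else if t.isEmpty then false
    else
      (List.range n).any (fun j =>
        let pj := (parts.getD j "").toList
        PySem.Chars.endswith t pj &&
          (let req := t.take (max 1 (t.length - pj.length))
           (List.range n).any (fun i =>
             decide (i ≠ j) && PySem.Chars.startswith (parts.getD i "").toList req)))

-- ===== PRECONDITION & SPEC =====
def Spec_is_concatenation_of_py (target : String) (parts : List String) (out : Bool) : Prop := out = is_concatenation_of_py_alt target parts
instance (target : String) (parts : List String) (out : Bool) : Decidable (Spec_is_concatenation_of_py target parts out) := by unfold Spec_is_concatenation_of_py; infer_instance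

-- ===== CLAIM (what is proved, stated in full; the proofs are below) =====
def Claim_equal_is_concatenation_of_py : Prop := ∀ (target : String) (parts : List String), Dom_is_concatenation_of_py target parts → Spec_is_concatenation_of_py target parts (is_concatenation_of_py target parts)

-- ===== LEMMAS AND PROOFS =====

-- helper predicates used only by the proofs
def pvP1 (t : List Char) (parts : List String) : Prop :=
  ∃ i k : Nat, i < parts.length ∧ 1 ≤ k ∧ i + k ≤ parts.length ∧
    (((parts.map String.toList).drop i).take k).flatten = t

def pvP2 (t : List Char) (parts : List String) : Prop :=
  t ≠ [] ∧ ∃ a b : Nat, a < parts.length ∧ b < parts.length ∧ a ≠ b ∧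
    (parts.getD b "").toList <:+ t ∧
    t.take (max 1 (t.length - (parts.getD b "").toList.length)) <+: (parts.getD a "").toList

theorem pvJoinNil (ls : List (List Char)) : List.intercalate [] ls = ls.flatten := by
  induction ls with
  | nil => simp [List.intercalate]
  | cons a t ih =>
    cases t with
    | nil => simp [List.intercalate]
    | cons b r =>
      simp [List.intercalate, List.intersperse] at *
      simpa [List.intercalate, List.intersperse] using ih

-- B's inner run loop finds exactly the joins of a nonempty first segment that equal t
theorem pvAltRun_iff (t : List Char) (l : List String) (s : List Char) :
    pvAltRun t l s = true ↔
      ∃ k : Nat, 1 ≤ k ∧ k ≤ l.length ∧ s ++ (((l.map String.toList).take k).flatten) = t := by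
  induction l generalizing s with
  | nil =>
    simp [pvAltRun]
  | cons p rest ih =>
    simp only [pvAltRun]
    split_ifs with h1 h2
    · -- too long: no k can work
      simp only [false_iff, not_exists]
      rintro k ⟨hk1, hk2, heq⟩
      obtain ⟨k', rfl⟩ : ∃ k', k = k' + 1 := ⟨k - 1, by omega⟩
      have := congrArg List.length heq
      simp [List.take_succ_cons] at this
      simp at h1
      omega
    · -- hit: k = 1 works
      simp only [true_iff]
      exact ⟨1, le_refl 1, by simp, by simpa using h2⟩
    · rw [ih]
      constructor
      · rintro ⟨k', hk1, hk2, heq⟩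
        exact ⟨k' + 1, by omega, by simp; omega, by simpa [List.take_succ_cons] using heq⟩
      · rintro ⟨k, hk1, hk2, heq⟩
        obtain ⟨k', rfl⟩ : ∃ k', k = k' + 1 := ⟨k - 1, by omega⟩
        cases Nat.eq_zero_or_pos k' with
        | inl h0 =>
          subst h0
          simp [List.take_succ_cons] at heq
          exact absurd heq h2
        | inr hpos =>
          exact ⟨k', by omega, by simp at hk2; omega, by simpa [List.take_succ_cons] using heq⟩

-- the prefix-length scan of A's method 2, characterised in closed form
theorem pvKey (t pi pj : List Char) :
    (∃ l : Nat, 1 ≤ l ∧ l ≤ pi.length ∧ pi.take l <+: t ∧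
        (t.drop l = pj ∨ (pj <:+ t ∧ (t.drop l).take (t.length - pj.length - l) = []))) ↔
      (t ≠ [] ∧ pj <:+ t ∧ t.take (max 1 (t.length - pj.length)) <+: pi) := by
  constructor
  · rintro ⟨l, hl1, hlm, hpre, hor⟩
    have hlen : (pi.take l).length = l := by simp; omega
    have hlt : l ≤ t.length := by
      have := hpre.length_le; omega
    have htake : pi.take l = t.take l := by
      have := List.prefix_iff_eq_take.mp hpre
      rw [this, hlen]
    have hne : t ≠ [] := by
      intro h; subst h; simp at hlt; omega
    cases hor with
    | inl hdrop =>
      have hpj : pj <:+ t := hdrop ▸ List.drop_suffix l t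
      have hlenpj : pj.length = t.length - l := by rw [← hdrop]; simp
      have hk : max 1 (t.length - pj.length) = l := by omega
      refine ⟨hne, hpj, ?_⟩
      rw [hk, ← htake]
      exact List.take_prefix l pi
    | inr hh =>
      obtain ⟨hpj, hmid⟩ := hh
      have hd : t.length - pj.length ≤ l := by
        rcases List.take_eq_nil_iff.mp hmid with h | h
        · omega
        · have := List.drop_eq_nil_iff.mp h
          omega
      refine ⟨hne, hpj, ?_⟩
      set k := max 1 (t.length - pj.length) with hkdef
      have hkl : k ≤ l := by omega
      have htk : t.take k = pi.take k := by
        have h1 : t.take k = (t.take l).take k := by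
          rw [List.take_take]; congr 1; omega
        rw [h1, ← htake, List.take_take]
        congr 1; omega
      rw [htk]
      exact List.take_prefix k pi
  · rintro ⟨hne, hpj, hreq⟩
    set k := max 1 (t.length - pj.length) with hkdef
    have hpjle : pj.length ≤ t.length := hpj.length_le
    have h1t : 1 ≤ t.length := by
      cases t with
      | nil => exact absurd rfl hne
      | cons a r => simp
    have hkt : k ≤ t.length := by omega
    have hlenreq : (t.take k).length = k := by simp; omega
    have hkpi : k ≤ pi.length := by
      have := hreq.length_le; omega
    have htake : t.take k = pi.take k := by
      have := List.prefix_iff_eq_take.mp hreq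
      rw [this, hlenreq]
    refine ⟨k, by omega, hkpi, ?_, Or.inr ⟨hpj, ?_⟩⟩
    · rw [← htake]; exact List.take_prefix k t
    · have : t.length - pj.length - k = 0 := by omega
      simp [this]

-- the join-of-a-slice test of A's method 1, per pair of indices
theorem pvA1_cond (target : String) (parts : List String) (a b : Nat) :
    ((PySem.Str.join "" (PySem.List.slice parts (some (a : Int)) (some (b : Int))) == target) = true) ↔
      (((parts.map String.toList).drop a).take (b - a)).flatten = target.toList := by
  rw [beq_iff_eq, String.ext_iff, PySem.Str.toList_join]
  simp only [String.toList_empty, PySem.Chars.join, pvJoinNil, PySem.List.slice_natCast,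
    List.map_take, List.map_drop]

theorem pvA1_iff (target : String) (parts : List String) :
    ((PySem.List.pyRange 0 ((parts.length : Int))).any (fun i =>
      (PySem.List.pyRange (i+1) ((parts.length : Int)+1)).any (fun j =>
        PySem.Str.join "" (PySem.List.slice parts (some i) (some j)) == target)) = true) ↔
      pvP1 target.toList parts := by
  rw [PySem.List.pyRange_zero_natCast]
  simp only [List.any_eq_true, List.mem_map, List.mem_range]
  constructor
  · rintro ⟨i, ⟨a, ha, rfl⟩, j, hj, hcond⟩
    rw [PySem.List.mem_pyRange_one] at hj
    have hb : j = ((j.toNat : Nat) : Int) := (Int.toNat_of_nonneg (by omega)).symm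
    rw [hb] at hcond hj
    rw [pvA1_cond] at hcond
    exact ⟨a, j.toNat - a, ha, by omega, by omega, hcond⟩
  · rintro ⟨i, k, hi, hk1, hik, heq⟩
    refine ⟨(i : Int), ⟨i, hi, rfl⟩, ((i + k : Nat) : Int), ?_, ?_⟩
    · rw [PySem.List.mem_pyRange_one]; push_cast; omega
    · rw [pvA1_cond]
      have : i + k - i = k := by omega
      rw [this]; exact heq

theorem pvB1_iff (target : String) (parts : List String) :
    ((List.range parts.length).any (fun i => pvAltRun target.toList (parts.drop i) []) = true) ↔
      pvP1 target.toList parts := by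
  simp only [List.any_eq_true, List.mem_range, pvAltRun_iff, List.nil_append,
    List.map_drop, List.length_drop]
  constructor
  · rintro ⟨i, hi, k, hk1, hk2, heq⟩
    exact ⟨i, k, hi, hk1, by omega, heq⟩
  · rintro ⟨i, k, hi, hk1, hik, heq⟩
    exact ⟨i, hi, k, hk1, by omega, heq⟩

-- one prefix-length test of A's method 2, at a Nat length l
theorem pvA2_condl (target pi pj : String) (l : Nat) (hl2 : l ≤ pi.toList.length) :
    (((PySem.Str.startswith target (PySem.Str.slice pi none (some (l:Int))) &&
        (PySem.Str.slice target (some (PySem.Str.len (PySem.Str.slice pi none (some (l:Int))))) none == pj)) ||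
      (PySem.Str.startswith target (PySem.Str.slice pi none (some (l:Int))) &&
        PySem.Str.endswith target pj &&
        (PySem.Str.slice target (some (PySem.Str.len (PySem.Str.slice pi none (some (l:Int)))))
           (some (PySem.Str.len target - PySem.Str.len pj)) == ""))) = true) ↔
    (pi.toList.take l <+: target.toList ∧
      (target.toList.drop l = pj.toList ∨
        (pj.toList <:+ target.toList ∧
          (target.toList.drop l).take (target.toList.length - pj.toList.length - l) = []))) := by
  have hpre : (PySem.Str.slice pi none (some (l:Int))).toList = pi.toList.take l := by
    rw [PySem.Str.toList_slice, PySem.Chars.slice_eq_listSlice,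
      PySem.List.slice_to _ (Int.natCast_nonneg l)]
    simp
  have hlen : (pi.toList.take l).length = l := by rw [List.length_take]; omega
  have hprelen : PySem.Str.len (PySem.Str.slice pi none (some (l:Int))) = (l : Int) := by
    rw [PySem.Str.len_eq, hpre, hlen]
  have hdrop : (PySem.Str.slice target (some (l:Int)) none).toList = target.toList.drop l := by
    rw [PySem.Str.toList_slice, PySem.Chars.slice_eq_listSlice,
      PySem.List.slice_from _ (Int.natCast_nonneg l)]
    simp
  rw [hprelen]
  simp only [Bool.or_eq_true, Bool.and_eq_true, beq_iff_eq, String.ext_iff, hdrop,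
    PySem.Str.startswith_eq, PySem.Chars.startswith_iff, hpre,
    PySem.Str.endswith_eq, PySem.Chars.endswith_iff, String.toList_empty, PySem.Str.len_eq]
  by_cases hend : pj.toList <:+ target.toList
  · have hle : pj.toList.length ≤ target.toList.length := hend.length_le
    have hd : ((target.toList.length : Int) - (pj.toList.length : Int)) =
        (((target.toList.length - pj.toList.length : Nat)) : Int) := by omega
    rw [hd]
    have hmid : (PySem.Str.slice target (some (l:Int))
        (some (((target.toList.length - pj.toList.length : Nat)) : Int))).toList =
        (target.toList.drop l).take (target.toList.length - pj.toList.length - l) := by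
      rw [PySem.Str.toList_slice, PySem.Chars.slice_eq_listSlice, PySem.List.slice_natCast,
        List.take_drop]
    rw [hmid, List.take_drop]
    constructor
    · rintro (⟨hs, hdr⟩ | ⟨⟨hs, _⟩, hm⟩)
      · exact ⟨hs, Or.inl hdr⟩
      · exact ⟨hs, Or.inr ⟨hend, hm⟩⟩
    · rintro ⟨hs, (hdr | ⟨_, hm⟩)⟩
      · exact Or.inl ⟨hs, hdr⟩
      · exact Or.inr ⟨⟨hs, hend⟩, hm⟩
  · constructor
    · rintro (⟨hs, hdr⟩ | ⟨⟨_, he⟩, _⟩)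
      · exact ⟨hs, Or.inl hdr⟩
      · exact absurd he hend
    · rintro ⟨hs, (hdr | ⟨he, _⟩)⟩
      · exact Or.inl ⟨hs, hdr⟩
      · exact absurd he hend

-- A's prefix-length scan over one ordered pair, in closed form
theorem pvA2_pair (target pi pj : String) :
    ((PySem.List.pyRange 1 (PySem.Str.len pi + 1)).any (fun L =>
       (PySem.Str.startswith target (PySem.Str.slice pi none (some L)) &&
         (PySem.Str.slice target (some (PySem.Str.len (PySem.Str.slice pi none (some L)))) none == pj)) ||
       (PySem.Str.startswith target (PySem.Str.slice pi none (some L)) &&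
         PySem.Str.endswith target pj &&
         (PySem.Str.slice target (some (PySem.Str.len (PySem.Str.slice pi none (some L))))
            (some (PySem.Str.len target - PySem.Str.len pj)) == ""))) = true) ↔
    (target.toList ≠ [] ∧ pj.toList <:+ target.toList ∧
      target.toList.take (max 1 (target.toList.length - pj.toList.length)) <+: pi.toList) := by
  rw [← pvKey]
  simp only [List.any_eq_true]
  constructor
  · rintro ⟨L, hL, hcond⟩
    rw [PySem.List.mem_pyRange_one, PySem.Str.len_eq] at hL
    have hLeq : L = ((L.toNat : Nat) : Int) := (Int.toNat_of_nonneg (by omega)).symm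
    rw [hLeq] at hcond
    rw [pvA2_condl target pi pj L.toNat (by omega)] at hcond
    exact ⟨L.toNat, by omega, by omega, hcond.1, hcond.2⟩
  · rintro ⟨l, hl1, hl2, hpre, hor⟩
    refine ⟨(l : Int), ?_, ?_⟩
    · rw [PySem.List.mem_pyRange_one, PySem.Str.len_eq]; omega
    · rw [pvA2_condl target pi pj l hl2]; exact ⟨hpre, hor⟩

-- A's whole method-2 double loop
theorem pvA2_iff (target : String) (parts : List String) :
    ((PySem.List.pyRange 0 ((parts.length : Int))).any (fun i =>
      (PySem.List.pyRange 0 ((parts.length : Int))).any (fun j =>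
        if i == j then false
        else
          (PySem.List.pyRange 1 (PySem.Str.len (PySem.List.pyGetD parts i "") + 1)).any (fun L =>
            (PySem.Str.startswith target
                (PySem.Str.slice (PySem.List.pyGetD parts i "") none (some L)) &&
              (PySem.Str.slice target
                  (some (PySem.Str.len
                    (PySem.Str.slice (PySem.List.pyGetD parts i "") none (some L)))) none ==
                PySem.List.pyGetD parts j "")) ||
            (PySem.Str.startswith target
                (PySem.Str.slice (PySem.List.pyGetD parts i "") none (some L)) &&
              PySem.Str.endswith target (PySem.List.pyGetD parts j "") &&
              (PySem.Str.slice target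
                  (some (PySem.Str.len
                    (PySem.Str.slice (PySem.List.pyGetD parts i "") none (some L))))
                  (some (PySem.Str.len target -
                    PySem.Str.len (PySem.List.pyGetD parts j ""))) == ""))))) = true) ↔
      pvP2 target.toList parts := by
  rw [PySem.List.pyRange_zero_natCast]
  simp only [List.any_eq_true, List.mem_map, List.mem_range]
  constructor
  · rintro ⟨i, ⟨a, ha, rfl⟩, j, ⟨b, hb, rfl⟩, hcond⟩
    by_cases hab : a = b
    · subst hab; simp at hcond
    · have hbeq : (((a : Nat) : Int) == ((b : Nat) : Int)) = false := by
        simp; omega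
      rw [if_neg (by simp [hbeq])] at hcond
      rw [PySem.List.pyGetD_natCast, PySem.List.pyGetD_natCast, pvA2_pair] at hcond
      exact ⟨hcond.1, a, b, ha, hb, hab, hcond.2.1, hcond.2.2⟩
  · rintro ⟨hne, a, b, ha, hb, hab, hsuf, hreq⟩
    refine ⟨(a : Int), ⟨a, ha, rfl⟩, (b : Int), ⟨b, hb, rfl⟩, ?_⟩
    rw [if_neg (by simp; omega)]
    rw [PySem.List.pyGetD_natCast, PySem.List.pyGetD_natCast, pvA2_pair]
    exact ⟨hne, hsuf, hreq⟩

-- B's whole method-2 loop (without the leading emptiness test)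
theorem pvB2_iff (target : String) (parts : List String) :
    ((List.range parts.length).any (fun j =>
      PySem.Chars.endswith target.toList (parts.getD j "").toList &&
        (List.range parts.length).any (fun i =>
          decide (i ≠ j) && PySem.Chars.startswith (parts.getD i "").toList
            (target.toList.take
              (max 1 (target.toList.length - (parts.getD j "").toList.length))))) = true) ↔
    (∃ a b : Nat, a < parts.length ∧ b < parts.length ∧ a ≠ b ∧
      (parts.getD b "").toList <:+ target.toList ∧
      target.toList.take (max 1 (target.toList.length - (parts.getD b "").toList.length)) <+:
        (parts.getD a "").toList) := by
  simp only [List.any_eq_true, List.mem_range, Bool.and_eq_true, decide_eq_true_iff,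
    PySem.Chars.endswith_iff, PySem.Chars.startswith_iff]
  constructor
  · rintro ⟨j, hj, hend, i, hi, hne, hstart⟩
    exact ⟨i, j, hi, hj, hne, hend, hstart⟩
  · rintro ⟨a, b, ha, hb, hne, hend, hstart⟩
    exact ⟨b, hb, hend, a, ha, hne, hstart⟩

theorem pvA_iff (target : String) (parts : List String) :
    is_concatenation_of_py target parts = true ↔
      (2 ≤ parts.length ∧ (pvP1 target.toList parts ∨ pvP2 target.toList parts)) := by
  simp only [is_concatenation_of_py]
  split_ifs with h1 h2
  · simp only [false_iff]
    rintro ⟨hle, -⟩; omega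
  · simp only [true_iff]
    exact ⟨by omega, Or.inl ((pvA1_iff target parts).mp h2)⟩
  · rw [pvA2_iff]
    constructor
    · intro h
      exact ⟨by omega, Or.inr h⟩
    · rintro ⟨-, (hp1 | hp2)⟩
      · exact absurd ((pvA1_iff target parts).mpr hp1) h2
      · exact hp2

theorem pvB_iff (target : String) (parts : List String) :
    is_concatenation_of_py_alt target parts = true ↔
      (2 ≤ parts.length ∧ (pvP1 target.toList parts ∨ pvP2 target.toList parts)) := by
  simp only [is_concatenation_of_py_alt]
  split_ifs with h1 h2 h3
  · simp only [false_iff]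
    rintro ⟨hle, -⟩; omega
  · simp only [true_iff]
    exact ⟨by omega, Or.inl ((pvB1_iff target parts).mp h2)⟩
  · simp only [false_iff]
    rintro ⟨-, (hp1 | hp2)⟩
    · exact h2 ((pvB1_iff target parts).mpr hp1)
    · exact hp2.1 (by simpa [List.isEmpty_iff] using h3)
  · rw [pvB2_iff]
    have hne : target.toList ≠ [] := by simpa [List.isEmpty_iff] using h3
    constructor
    · intro h
      exact ⟨by omega, Or.inr ⟨hne, h⟩⟩
    · rintro ⟨-, (hp1 | hp2)⟩
      · exact absurd ((pvB1_iff target parts).mpr hp1) h2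
      · exact hp2.2

theorem pvMain (target : String) (parts : List String) :
    is_concatenation_of_py target parts = is_concatenation_of_py_alt target parts := by
  rw [Bool.eq_iff_iff, pvA_iff, pvB_iff]

-- ===== VERDICT (by name: the statement is the Claim_ definition above) =====
theorem is_concatenation_of_py_spec : Claim_equal_is_concatenation_of_py := by
  intro target parts _
  unfold Spec_is_concatenation_of_py
  exact pvMain target parts
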